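-- pv_equiv track=rewrite | github.com/iwtbam/leetcode | code/lt面试题 08.14.py | countEval
-- ===== SOURCE A (Python) =====
-- def countEval(s: str, result: int) -> int:
--     n = len(s)
--     dp = [[[0, 0] for _ in range(n)] for _ in range(n)]
--
--     for i in range(n):
--         c = s[i]
--         if c == '0':
--             dp[i][i][0] = 1
--         if c == '1':
--             dp[i][i][1] = 1
--
--     for l in range(2, n + 1):
--         for i in range(0, n - l + 1):
--             j = i + l - 1
--             for k in range(i + 1, j):
--                 if s[k] in ['0', '1']:
--                     continue
--
--                 if s[k] == '|':
--                     dp[i][j][0] += dp[i][k - 1][0] * dp[k+1][j][0]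
--                     dp[i][j][1] += dp[i][k - 1][0] * dp[k+1][j][1] + dp[i][k - 1][1] * dp[k+1][j][0] + dp[i][k - 1][1] * dp[k+1][j][1]
--
--                 if s[k] == '&':
--                     dp[i][j][0] += dp[i][k - 1][0] * dp[k+1][j][1] + dp[i][k - 1][1] * dp[k+1][j][0] + dp[i][k - 1][0] * dp[k+1][j][0]
--                     dp[i][j][1] += dp[i][k - 1][1] * dp[k+1][j][1]
--
--                 if s[k] == '^':
--                     dp[i][j][0] += dp[i][k - 1][0] * dp[k+1][j][0] + dp[i][k - 1][1] * dp[k+1][j][1]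
--                     dp[i][j][1] += dp[i][k - 1][0] * dp[k+1][j][1] + dp[i][k - 1][1] * dp[k+1][j][0]
--     return dp[0][n - 1][result]
-- ===== SOURCE B (Python) =====
-- def countEval(s: str, result: int) -> int:
--     n = len(s)
--     memo = {}
--
--     def solve(i, j):
--         if (i, j) in memo:
--             return memo[(i, j)]
--         if i == j:
--             res = [1 if s[i] == '0' else 0, 1 if s[i] == '1' else 0]
--         else:
--             c0 = 0
--             c1 = 0
--             for k in range(i + 1, j):
--                 c = s[k]
--                 if c != '|' and c != '&' and c != '^':
--                     continue
--                 a0, a1 = solve(i, k - 1)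
--                 b0, b1 = solve(k + 1, j)
--                 if c == '|':
--                     c0 += a0 * b0
--                     c1 += a0 * b1 + a1 * b0 + a1 * b1
--                 elif c == '&':
--                     c0 += a0 * b1 + a1 * b0 + a0 * b0
--                     c1 += a1 * b1
--                 else:
--                     c0 += a0 * b0 + a1 * b1
--                     c1 += a0 * b1 + a1 * b0
--             res = [c0, c1]
--         memo[(i, j)] = res
--         return res
--
--     return solve(0, n - 1)[result]
-- ===== Notes on version B (the rewrite author's own statement) =====
-- stated objective: alternative
-- what changed: Replaced the bottom-up three-level loop over a preallocated n*n*2 table by a top-down memoized recursion solve(i,j) on a dict keyed by span endpoints, which only ever computes the spans actually reachable from (0, n-1).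
import Mathlib
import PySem

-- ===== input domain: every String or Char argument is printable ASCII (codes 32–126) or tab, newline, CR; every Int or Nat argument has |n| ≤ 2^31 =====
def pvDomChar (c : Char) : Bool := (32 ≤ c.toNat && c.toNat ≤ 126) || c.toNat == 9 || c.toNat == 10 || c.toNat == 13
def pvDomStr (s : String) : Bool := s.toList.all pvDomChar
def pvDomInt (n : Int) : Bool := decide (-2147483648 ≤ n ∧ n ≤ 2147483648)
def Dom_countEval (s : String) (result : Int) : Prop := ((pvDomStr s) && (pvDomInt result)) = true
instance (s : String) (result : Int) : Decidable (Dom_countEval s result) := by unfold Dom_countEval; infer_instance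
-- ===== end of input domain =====

-- B replaces A's bottom-up n×n×2 table (three nested loops over span lengths) by a
-- top-down memoized recursion solve(i, j) over a dictionary keyed by span endpoints;
-- equal return values wherever A returns (Pre_); on the empty string A raises, B returns 0.

-- ===== PORT A =====
-- s[k] for an index the loops keep in range; the ' ' default is never read under those bounds
def pvChAt (cs : List Char) (k : Int) : Char := PySem.List.pyGetD cs k ' '

-- dp[i][j] read / write on the n×n table of pairs (indices the loops keep in range)
def pvGet (dp : List (List (Int × Int))) (i j : Int) : Int × Int :=
  PySem.List.pyGetD (PySem.List.pyGetD dp i []) j ((0 : Int), (0 : Int))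
def pvSet (dp : List (List (Int × Int))) (i j : Int) (v : Int × Int) : List (List (Int × Int)) :=
  PySem.List.pySetD dp i (PySem.List.pySetD (PySem.List.pyGetD dp i []) j v)

-- body of A's innermost k-loop: the skip and the three sequential `if` updates
def pvStepK (cs : List Char) (i j : Int) (dp : List (List (Int × Int))) (k : Int) :
    List (List (Int × Int)) :=
  let c := pvChAt cs k
  if c = '0' ∨ c = '1' then dp
  else
    let dp1 := if c = '|' then
        pvSet dp i j
          ((pvGet dp i j).1 + (pvGet dp i (k-1)).1 * (pvGet dp (k+1) j).1,
           (pvGet dp i j).2 + (pvGet dp i (k-1)).1 * (pvGet dp (k+1) j).2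
             + (pvGet dp i (k-1)).2 * (pvGet dp (k+1) j).1
             + (pvGet dp i (k-1)).2 * (pvGet dp (k+1) j).2)
      else dp
    let dp2 := if c = '&' then
        pvSet dp1 i j
          ((pvGet dp1 i j).1 + (pvGet dp1 i (k-1)).1 * (pvGet dp1 (k+1) j).2
             + (pvGet dp1 i (k-1)).2 * (pvGet dp1 (k+1) j).1
             + (pvGet dp1 i (k-1)).1 * (pvGet dp1 (k+1) j).1,
           (pvGet dp1 i j).2 + (pvGet dp1 i (k-1)).2 * (pvGet dp1 (k+1) j).2)
      else dp1
    if c = '^' then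
        pvSet dp2 i j
          ((pvGet dp2 i j).1 + (pvGet dp2 i (k-1)).1 * (pvGet dp2 (k+1) j).1
             + (pvGet dp2 i (k-1)).2 * (pvGet dp2 (k+1) j).2,
           (pvGet dp2 i j).2 + (pvGet dp2 i (k-1)).1 * (pvGet dp2 (k+1) j).2
             + (pvGet dp2 i (k-1)).2 * (pvGet dp2 (k+1) j).1)
      else dp2

def countEval (s : String) (result : Int) : Int :=
  let cs := s.toList
  let n : Int := PySem.Str.len s
  let dpInit := (PySem.List.pyRange 0 n 1).foldl (fun dp i =>
    let c := pvChAt cs i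
    let dpa := if c = '0' then pvSet dp i i (1, (pvGet dp i i).2) else dp
    if c = '1' then pvSet dpa i i ((pvGet dpa i i).1, 1) else dpa)
    ((PySem.List.pyRange 0 n 1).map (fun _ =>
      (PySem.List.pyRange 0 n 1).map (fun _ => ((0 : Int), (0 : Int)))))
  let dpF := (PySem.List.pyRange 2 (n+1) 1).foldl (fun dp l =>
    (PySem.List.pyRange 0 (n - l + 1) 1).foldl (fun dp i =>
      let j := i + l - 1
      (PySem.List.pyRange (i+1) j 1).foldl (pvStepK cs i j) dp) dp) dpInit
  -- dp[0][n-1][result]: pyGet? is none exactly where Python raises (excluded by Pre_)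
  (PySem.List.pyGet? [(pvGet dpF 0 (n-1)).1, (pvGet dpF 0 (n-1)).2] result).getD 0

-- ===== PORT B =====
-- the |/&/^ count combination of B's loop body (final else = the '^' arm, reached only for '^')
def pvComb (c : Char) (a b : Int × Int) (c0 c1 : Int) : Int × Int :=
  if c = '|' then (c0 + a.1 * b.1, c1 + a.1 * b.2 + a.2 * b.1 + a.2 * b.2)
  else if c = '&' then (c0 + a.1 * b.2 + a.2 * b.1 + a.1 * b.1, c1 + a.2 * b.2)
  else (c0 + a.1 * b.1 + a.2 * b.2, c1 + a.1 * b.2 + a.2 * b.1)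

-- B's solve(i, j) with the memo dict threaded through; the fuel only makes the
-- recursion structural (any fuel > j - i gives the same run as the Python)
def pvSolve (cs : List Char) :
    Nat → PySem.Dict (Int × Int) (Int × Int) → Int → Int →
    PySem.Dict (Int × Int) (Int × Int) × (Int × Int)
  | 0, m, _, _ => (m, (0, 0))
  | Nat.succ fuel, m, i, j =>
    match PySem.Dict.get? m (i, j) with
    | some v => (m, v)
    | none =>
      let st :=
        if i = j then
          (m, ((if pvChAt cs i = '0' then (1 : Int) else 0),
               (if pvChAt cs i = '1' then (1 : Int) else 0)))
        else
          (PySem.List.pyRange (i+1) j 1).foldl (fun st k =>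
            let c := pvChAt cs k
            if c ≠ '|' ∧ c ≠ '&' ∧ c ≠ '^' then st
            else
              let ra := pvSolve cs fuel st.1 i (k-1)
              let rb := pvSolve cs fuel ra.1 (k+1) j
              (rb.1, pvComb c ra.2 rb.2 st.2.1 st.2.2)) (m, (0, 0))
      (PySem.Dict.insert st.1 (i, j) st.2, st.2)

def countEval_alt (s : String) (result : Int) : Int :=
  let cs := s.toList
  let n : Int := PySem.Str.len s
  let r := pvSolve cs cs.length PySem.Dict.empty 0 (n - 1)
  (PySem.List.pyGet? [r.2.1, r.2.2] result).getD 0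

-- ===== PRECONDITION & SPEC =====
-- Pre_ excludes exactly the inputs where A raises IndexError: the empty string
-- (dp[0][n-1] on an empty table) and result outside -2..1 (index into the 2-list dp[i][j]).
def Pre_countEval (s : String) (result : Int) : Prop :=
  s.toList ≠ [] ∧ -2 ≤ result ∧ result ≤ 1
instance (s : String) (result : Int) : Decidable (Pre_countEval s result) := by
  unfold Pre_countEval; infer_instance
def pvWitness_countEval : String × Int := ("1^0|0|1", 1)

def Spec_countEval (s : String) (result : Int) (out : Int) : Prop := out = countEval_alt s result
instance (s : String) (result : Int) (out : Int) : Decidable (Spec_countEval s result out) := by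
  unfold Spec_countEval; infer_instance

-- ===== CLAIM (what is proved, stated in full; the proofs are below) =====
def Claim_equal_countEval : Prop := ∀ (s : String) (result : Int),
  Dom_countEval s result → Pre_countEval s result → Spec_countEval s result (countEval s result)
-- ===== LEMMAS AND PROOFS =====

-- the mathematical span value both programs compute: one combination step …
def pvEstep (c : Char) (a b p : Int × Int) : Int × Int :=
  if c = '|' then (p.1 + a.1 * b.1, p.2 + a.1 * b.2 + a.2 * b.1 + a.2 * b.2)
  else if c = '&' then (p.1 + a.1 * b.2 + a.2 * b.1 + a.1 * b.1, p.2 + a.2 * b.2)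
  else if c = '^' then (p.1 + a.1 * b.1 + a.2 * b.2, p.2 + a.1 * b.2 + a.2 * b.1)
  else p

-- … and the fueled recursion on spans
def pvE (cs : List Char) : Nat → Int → Int → Int × Int
  | 0, _, _ => (0, 0)
  | Nat.succ f, i, j =>
    if i = j then
      ((if pvChAt cs i = '0' then 1 else 0), (if pvChAt cs i = '1' then 1 else 0))
    else
      (PySem.List.pyRange (i+1) j 1).foldl
        (fun p k => pvEstep (pvChAt cs k) (pvE cs f i (k-1)) (pvE cs f (k+1) j) p) (0, 0)

def pvEv (cs : List Char) (i j : Int) : Int × Int := pvE cs ((j - i).toNat + 1) i j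

lemma pvE_fuel (cs : List Char) :
    ∀ (f g : Nat) (i j : Int), j - i < (f : Int) → j - i < (g : Int) →
      pvE cs f i j = pvE cs g i j := by
  intro f
  induction f with
  | zero =>
    intro g i j hf hg
    cases g with
    | zero => rfl
    | succ g' =>
      simp only [pvE]
      rw [if_neg (by omega), PySem.List.pyRange_one_eq_nil (by omega)]
      rfl
  | succ f' ih =>
    intro g i j hf hg
    cases g with
    | zero =>
      simp only [pvE]
      rw [if_neg (by omega), PySem.List.pyRange_one_eq_nil (by omega)]
      rfl
    | succ g' =>
      simp only [pvE]
      by_cases hij : i = j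
      · rw [if_pos hij, if_pos hij]
      · rw [if_neg hij, if_neg hij]
        apply PySem.List.foldl_congr_mem
        intro p k hk
        rw [PySem.List.mem_pyRange_one] at hk
        push_cast at hf hg
        rw [ih g' i (k-1) (by omega) (by omega), ih g' (k+1) j (by omega) (by omega)]

lemma pvEv_eq (cs : List Char) (f : Nat) (i j : Int) (h : j - i < (f : Int)) :
    pvE cs f i j = pvEv cs i j :=
  pvE_fuel cs f ((j - i).toNat + 1) i j h (by push_cast; omega)

lemma pvEv_diag (cs : List Char) (i : Int) :
    pvEv cs i i =
      ((if pvChAt cs i = '0' then 1 else 0), (if pvChAt cs i = '1' then 1 else 0)) := by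
  show pvE cs ((i - i).toNat + 1) i i = _
  rw [sub_self]
  simp [pvE]

lemma pvEv_gt (cs : List Char) (i j : Int) (h : j < i) : pvEv cs i j = (0, 0) := by
  show pvE cs ((j - i).toNat + 1) i j = _
  simp only [pvE]
  rw [if_neg (by omega), PySem.List.pyRange_one_eq_nil (by omega)]
  rfl

lemma pvEv_lt (cs : List Char) (i j : Int) (h : i < j) :
    pvEv cs i j = (PySem.List.pyRange (i+1) j 1).foldl
      (fun p k => pvEstep (pvChAt cs k) (pvEv cs i (k-1)) (pvEv cs (k+1) j) p) (0, 0) := by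
  show pvE cs ((j - i).toNat + 1) i j = _
  simp only [pvE]
  rw [if_neg (by omega)]
  apply PySem.List.foldl_congr_mem
  intro p k hk
  rw [PySem.List.mem_pyRange_one] at hk
  rw [pvEv_eq cs _ i (k-1) (by push_cast; omega), pvEv_eq cs _ (k+1) j (by push_cast; omega)]

-- memo invariant: every stored value is the span value
def pvMemOK (cs : List Char) (m : PySem.Dict (Int × Int) (Int × Int)) : Prop :=
  ∀ p v, PySem.Dict.get? m p = some v → v = pvEv cs p.1 p.2

lemma pvComb_eq_estep (c : Char) (a b : Int × Int) (p : Int × Int)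
    (h : c = '|' ∨ c = '&' ∨ c = '^') :
    pvComb c a b p.1 p.2 = pvEstep c a b p := by
  rcases h with h | h | h <;> subst h <;> simp [pvComb, pvEstep]

lemma pvEstep_skip (c : Char) (a b : Int × Int) (p : Int × Int)
    (h : ¬(c = '|' ∨ c = '&' ∨ c = '^')) : pvEstep c a b p = p := by
  push_neg at h
  simp [pvEstep, h.1, h.2.1, h.2.2]

lemma pvSolve_ok (cs : List Char) :
    ∀ (f : Nat) (m : PySem.Dict (Int × Int) (Int × Int)) (i j : Int),
      pvMemOK cs m → j - i < (f : Int) →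
      (pvSolve cs f m i j).2 = pvEv cs i j ∧ pvMemOK cs (pvSolve cs f m i j).1 := by
  intro f
  induction f with
  | zero =>
    intro m i j hm hf
    exact ⟨(pvEv_gt cs i j (by omega)).symm, hm⟩
  | succ f' ih =>
    intro m i j hm hf
    simp only [pvSolve]
    cases hget : PySem.Dict.get? m (i, j) with
    | some v => exact ⟨hm (i, j) v hget, hm⟩
    | none =>
      have push_hf : j - i < (f' : Int) + 1 := by push_cast at hf; exact_mod_cast hf
      by_cases hij : i = j
      · subst hij
        simp only [if_pos rfl]
        refine ⟨(pvEv_diag cs i).symm, ?_⟩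
        intro p v hp
        by_cases hpe : p = (i, i)
        · subst hpe
          rw [PySem.Dict.get?_insert_self] at hp
          cases hp
          exact (pvEv_diag cs i).symm
        · rw [PySem.Dict.get?_insert_of_ne _ _ hpe] at hp
          exact hm p v hp
      · simp only [if_neg hij]
        have key : ∀ (ks : List Int), (∀ k ∈ ks, i + 1 ≤ k ∧ k < j) →
            ∀ (st : PySem.Dict (Int × Int) (Int × Int) × (Int × Int)), pvMemOK cs st.1 →
            pvMemOK cs ((ks.foldl (fun st k =>
              if pvChAt cs k ≠ '|' ∧ pvChAt cs k ≠ '&' ∧ pvChAt cs k ≠ '^' then st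
              else ((pvSolve cs f' (pvSolve cs f' st.1 i (k-1)).1 (k+1) j).1,
                pvComb (pvChAt cs k) (pvSolve cs f' st.1 i (k-1)).2
                  (pvSolve cs f' (pvSolve cs f' st.1 i (k-1)).1 (k+1) j).2 st.2.1 st.2.2)) st)).1 ∧
            ((ks.foldl (fun st k =>
              if pvChAt cs k ≠ '|' ∧ pvChAt cs k ≠ '&' ∧ pvChAt cs k ≠ '^' then st
              else ((pvSolve cs f' (pvSolve cs f' st.1 i (k-1)).1 (k+1) j).1,
                pvComb (pvChAt cs k) (pvSolve cs f' st.1 i (k-1)).2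
                  (pvSolve cs f' (pvSolve cs f' st.1 i (k-1)).1 (k+1) j).2 st.2.1 st.2.2)) st)).2 =
            ks.foldl (fun p k => pvEstep (pvChAt cs k) (pvEv cs i (k-1)) (pvEv cs (k+1) j) p) st.2 := by
          intro ks
          induction ks with
          | nil => intro _ st hst; exact ⟨hst, rfl⟩
          | cons k ks ihk =>
            intro hks st hst
            have hk := hks k (List.mem_cons_self ..)
            have hbound1 : (k - 1) - i < (f' : Int) := by omega
            have hbound2 : j - (k + 1) < (f' : Int) := by omega
            simp only [List.foldl_cons]
            by_cases hc : pvChAt cs k = '|' ∨ pvChAt cs k = '&' ∨ pvChAt cs k = '^'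
            · have hcond : ¬(pvChAt cs k ≠ '|' ∧ pvChAt cs k ≠ '&' ∧ pvChAt cs k ≠ '^') := by
                tauto
              simp only [if_neg hcond]
              obtain ⟨ha2, ha1⟩ := ih st.1 i (k-1) hst hbound1
              obtain ⟨hb2, hb1⟩ := ih (pvSolve cs f' st.1 i (k-1)).1 (k+1) j ha1 hbound2
              have := ihk (fun k' hk' => hks k' (List.mem_cons_of_mem _ hk'))
                ((pvSolve cs f' (pvSolve cs f' st.1 i (k-1)).1 (k+1) j).1,
                  pvComb (pvChAt cs k) (pvSolve cs f' st.1 i (k-1)).2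
                    (pvSolve cs f' (pvSolve cs f' st.1 i (k-1)).1 (k+1) j).2 st.2.1 st.2.2) hb1
              refine ⟨this.1, ?_⟩
              rw [this.2]
              congr 1
              rw [ha2, hb2, pvComb_eq_estep _ _ _ _ hc]
            · have hcond : pvChAt cs k ≠ '|' ∧ pvChAt cs k ≠ '&' ∧ pvChAt cs k ≠ '^' := by
                tauto
              simp only [if_pos hcond]
              have := ihk (fun k' hk' => hks k' (List.mem_cons_of_mem _ hk')) st hst
              refine ⟨this.1, ?_⟩
              rw [this.2, pvEstep_skip _ _ _ _ hc]
        have hmem : ∀ k ∈ PySem.List.pyRange (i+1) j 1, i + 1 ≤ k ∧ k < j := by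
          intro k hk
          rw [PySem.List.mem_pyRange_one] at hk
          omega
        obtain ⟨h1, h2⟩ := key (PySem.List.pyRange (i+1) j 1) hmem (m, (0, 0)) hm
        have hres : ((PySem.List.pyRange (i+1) j 1).foldl (fun st k =>
              if pvChAt cs k ≠ '|' ∧ pvChAt cs k ≠ '&' ∧ pvChAt cs k ≠ '^' then st
              else ((pvSolve cs f' (pvSolve cs f' st.1 i (k-1)).1 (k+1) j).1,
                pvComb (pvChAt cs k) (pvSolve cs f' st.1 i (k-1)).2
                  (pvSolve cs f' (pvSolve cs f' st.1 i (k-1)).1 (k+1) j).2 st.2.1 st.2.2)) (m, (0, 0))).2 = pvEv cs i j := by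
          rw [h2]
          by_cases hlt : i < j
          · rw [pvEv_lt cs i j hlt]
          · rw [pvEv_gt cs i j (by omega), PySem.List.pyRange_one_eq_nil (by omega)]
            rfl
        refine ⟨hres, ?_⟩
        intro p v hp
        by_cases hpe : p = (i, j)
        · subst hpe
          rw [PySem.Dict.get?_insert_self] at hp
          cases hp
          exact hres
        · rw [PySem.Dict.get?_insert_of_ne _ _ hpe] at hp
          exact h1 p v hp

-- B's toplevel value
lemma countEval_alt_eq (s : String) (result : Int) :
    countEval_alt s result =
      (PySem.List.pyGet? [(pvEv s.toList 0 ((s.toList.length : Int) - 1)).1,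
                          (pvEv s.toList 0 ((s.toList.length : Int) - 1)).2] result).getD 0 := by
  have hempty : pvMemOK s.toList PySem.Dict.empty := by
    intro p v hp
    rw [PySem.Dict.get?_empty] at hp
    cases hp
  have h := pvSolve_ok s.toList s.toList.length PySem.Dict.empty 0
      ((s.toList.length : Int) - 1) hempty (by omega)
  simp only [countEval_alt, PySem.Str.len_eq]
  rw [h.1]

-- ===== A-side loop invariants =====

-- the table keeps its n×n shape
def pvDims (N : Nat) (dp : List (List (Int × Int))) : Prop :=
  dp.length = N ∧ ∀ row ∈ dp, row.length = N

lemma pvGet_eq (dp : List (List (Int × Int))) (i j : Int) (hi : 0 ≤ i) (hj : 0 ≤ j) :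
    pvGet dp i j = (dp.getD i.toNat []).getD j.toNat ((0 : Int), (0 : Int)) := by
  unfold pvGet
  rw [PySem.List.pyGetD_of_nonneg _ _ hj, PySem.List.pyGetD_of_nonneg _ _ hi]

lemma pvSet_eq (dp : List (List (Int × Int))) (i j : Int) (v : Int × Int)
    (hi : 0 ≤ i) (hj : 0 ≤ j) :
    pvSet dp i j v = dp.set i.toNat ((dp.getD i.toNat []).set j.toNat v) := by
  unfold pvSet
  rw [PySem.List.pySetD_of_nonneg _ _ hj, PySem.List.pySetD_of_nonneg _ _ hi,
      PySem.List.pyGetD_of_nonneg _ _ hi]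

lemma pvDims_set (N : Nat) (dp : List (List (Int × Int))) (i j : Int) (v : Int × Int)
    (hi : 0 ≤ i) (hj : 0 ≤ j) (hd : pvDims N dp) : pvDims N (pvSet dp i j v) := by
  obtain ⟨hL, hrows⟩ := hd
  rw [pvSet_eq dp i j v hi hj]
  refine ⟨by rw [List.length_set]; exact hL, ?_⟩
  intro row hrow
  by_cases hir : i.toNat < dp.length
  · rcases List.mem_or_eq_of_mem_set hrow with h | h
    · exact hrows row h
    · subst h
      rw [List.length_set, List.getD_eq_getElem _ _ hir]
      exact hrows _ (List.getElem_mem hir)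
  · rw [List.set_eq_of_length_le (by omega)] at hrow
    exact hrows row hrow

lemma pvGetD_set_same {A : Type} (xs : List A) (n : Nat) (v d : A) (h : n < xs.length) :
    (xs.set n v).getD n d = v := by
  rw [List.getD_eq_getElem _ _ (by rw [List.length_set]; exact h)]
  exact List.getElem_set_self (by simpa using h)

lemma pvGetD_set_ne {A : Type} (xs : List A) (n m : Nat) (v d : A) (h : n ≠ m) :
    (xs.set n v).getD m d = xs.getD m d := by
  by_cases hm : m < xs.length
  · rw [List.getD_eq_getElem _ _ (by rw [List.length_set]; exact hm),
        List.getD_eq_getElem _ _ hm]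
    exact List.getElem_set_ne h (by simpa using hm)
  · rw [List.getD_eq_default _ _ (by rw [List.length_set]; omega),
        List.getD_eq_default _ _ (by omega)]

lemma pvGet_set' (N : Nat) (dp : List (List (Int × Int))) (hd : pvDims N dp)
    (i j i' j' : Int) (v : Int × Int)
    (hi : 0 ≤ i) (hiN : i < (N : Int)) (hj : 0 ≤ j) (hjN : j < (N : Int))
    (hi' : 0 ≤ i') (hj' : 0 ≤ j') :
    pvGet (pvSet dp i j v) i' j' = if i' = i ∧ j' = j then v else pvGet dp i' j' := by
  obtain ⟨hL, hrows⟩ := hd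
  have hiL : i.toNat < dp.length := by omega
  have hrowlen : (dp.getD i.toNat []).length = N := by
    rw [List.getD_eq_getElem _ _ hiL]
    exact hrows _ (List.getElem_mem hiL)
  rw [pvSet_eq dp i j v hi hj, pvGet_eq _ i' j' hi' hj', pvGet_eq dp i' j' hi' hj']
  by_cases hii : i' = i
  · rw [hii, pvGetD_set_same dp i.toNat _ _ hiL]
    by_cases hjj : j' = j
    · rw [hjj, pvGetD_set_same _ j.toNat _ _ (by omega), if_pos ⟨rfl, rfl⟩]
    · rw [pvGetD_set_ne _ j.toNat j'.toNat _ _ (by omega), if_neg (fun h => hjj h.2)]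
  · rw [pvGetD_set_ne dp i.toNat i'.toNat _ _ (by omega), if_neg (fun h => hii h.1)]

-- one step of the first loop: only the diagonal cell (a,a) changes
lemma pvInitStep (cs : List Char) (N : Nat) (dp : List (List (Int × Int))) (a : Int)
    (hd : pvDims N dp) (h0 : 0 ≤ a) (haN : a < (N : Int))
    (hda : pvGet dp a a = (0, 0)) (i' j' : Int) (hi' : 0 ≤ i') (hj' : 0 ≤ j') :
    pvGet (if pvChAt cs a = '1' then
        pvSet (if pvChAt cs a = '0' then pvSet dp a a (1, (pvGet dp a a).2) else dp) a a
          ((pvGet (if pvChAt cs a = '0' then pvSet dp a a (1, (pvGet dp a a).2) else dp) a a).1, 1)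
      else if pvChAt cs a = '0' then pvSet dp a a (1, (pvGet dp a a).2) else dp) i' j' =
      if i' = a ∧ j' = a then pvEv cs a a else pvGet dp i' j' := by
  rw [pvEv_diag, hda]
  by_cases h0' : pvChAt cs a = '0' <;> by_cases h1' : pvChAt cs a = '1'
  · exact absurd (h0'.symm.trans h1') (by decide)
  · rw [if_neg h1', if_pos h0',
        pvGet_set' N dp hd a a i' j' _ h0 haN h0 haN hi' hj',
        if_pos h0', if_neg h1']
  · rw [if_pos h1', if_neg h0', if_neg h0',
        pvGet_set' N dp hd a a i' j' _ h0 haN h0 haN hi' hj', hda,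
        if_pos h1']
  · rw [if_neg h1', if_neg h0']
    split_ifs with h
    · rw [h.1, h.2, hda]
    · rfl

-- after the first loop: the diagonal up to n is filled, everything else is (0,0)
lemma pvInitLoop (cs : List Char) (N : Nat) :
    ∀ (fu : Nat) (a : Int) (dp : List (List (Int × Int))), 0 ≤ a → a ≤ (N : Int) →
      ((N : Int) - a).toNat ≤ fu → pvDims N dp →
      (∀ i j : Int, 0 ≤ i → 0 ≤ j →
        pvGet dp i j = if i = j ∧ i < a then pvEv cs i i else (0, 0)) →
      pvDims N ((PySem.List.pyRange a (N : Int) 1).foldl (fun dp i =>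
          let c := pvChAt cs i
          let dpa := if c = '0' then pvSet dp i i (1, (pvGet dp i i).2) else dp
          if c = '1' then pvSet dpa i i ((pvGet dpa i i).1, 1) else dpa) dp) ∧
      ∀ i j : Int, 0 ≤ i → 0 ≤ j →
        pvGet ((PySem.List.pyRange a (N : Int) 1).foldl (fun dp i =>
          let c := pvChAt cs i
          let dpa := if c = '0' then pvSet dp i i (1, (pvGet dp i i).2) else dp
          if c = '1' then pvSet dpa i i ((pvGet dpa i i).1, 1) else dpa) dp) i j =
        if i = j ∧ i < (N : Int) then pvEv cs i i else (0, 0) := by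
  intro fu
  induction fu with
  | zero =>
    intro a dp h0 hn hfu hd hdp
    have han : a = (N : Int) := by omega
    subst han
    rw [PySem.List.pyRange_one_eq_nil (by omega)]
    simp only [List.foldl_nil]
    exact ⟨hd, hdp⟩
  | succ fu' ih =>
    intro a dp h0 hn hfu hd hdp
    by_cases hlt : a < (N : Int)
    · rw [PySem.List.pyRange_one_cons hlt, List.foldl_cons]
      have hda : pvGet dp a a = (0, 0) := by rw [hdp a a h0 h0, if_neg (by omega)]
      have hd' : pvDims N (if pvChAt cs a = '1' then
          pvSet (if pvChAt cs a = '0' then pvSet dp a a (1, (pvGet dp a a).2) else dp) a a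
            ((pvGet (if pvChAt cs a = '0' then pvSet dp a a (1, (pvGet dp a a).2) else dp) a a).1, 1)
        else if pvChAt cs a = '0' then pvSet dp a a (1, (pvGet dp a a).2) else dp) := by
        split_ifs <;>
          first
            | exact hd
            | exact pvDims_set N _ a a _ h0 h0 hd
            | exact pvDims_set N _ a a _ h0 h0 (pvDims_set N dp a a _ h0 h0 hd)
      apply ih (a + 1) _ (by omega) (by omega) (by omega) hd'
      intro i2 j2 hi2 hj2
      rw [pvInitStep cs N dp a hd h0 hlt hda i2 j2 hi2 hj2, hdp i2 j2 hi2 hj2]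
      split_ifs with h1 h2 h3 <;> first | rfl | omega | rw [h1.1]
    · have han : a = (N : Int) := by omega
      subst han
      rw [PySem.List.pyRange_one_eq_nil (by omega)]
      simp only [List.foldl_nil]
      exact ⟨hd, hdp⟩

-- the inner k-loop for one cell (i,j): it only changes (i,j), accumulating pvEstep
lemma pvInnerLoop (cs : List Char) (N : Nat) (i j : Int)
    (hi : 0 ≤ i) (hij : i < j) (hjN : j < (N : Int)) :
    ∀ (ks : List Int), (∀ k ∈ ks, i + 1 ≤ k ∧ k < j) →
      ∀ (dp : List (List (Int × Int))), pvDims N dp →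
        (∀ k, i + 1 ≤ k → k < j →
          pvGet dp i (k-1) = pvEv cs i (k-1) ∧ pvGet dp (k+1) j = pvEv cs (k+1) j) →
        pvDims N (ks.foldl (pvStepK cs i j) dp) ∧
        ∀ i' j', 0 ≤ i' → 0 ≤ j' →
          pvGet (ks.foldl (pvStepK cs i j) dp) i' j' =
            if i' = i ∧ j' = j then
              ks.foldl (fun p k =>
                pvEstep (pvChAt cs k) (pvEv cs i (k-1)) (pvEv cs (k+1) j) p) (pvGet dp i j)
            else pvGet dp i' j' := by
  intro ks
  induction ks with
  | nil =>
    intro _ dp hd _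
    refine ⟨hd, ?_⟩
    intro i' j' _ _
    simp only [List.foldl_nil]
    split_ifs with h
    · rw [h.1, h.2]
    · rfl
  | cons k ks ihk =>
    intro hks dp hd hdp
    have hk := hks k (List.mem_cons_self ..)
    have hiN : i < (N : Int) := by omega
    have hj0 : (0 : Int) ≤ j := by omega
    have hreads := hdp k hk.1 hk.2
    have hdstep : pvDims N (pvStepK cs i j dp k) := by
      simp only [pvStepK]
      split_ifs <;>
        (repeat
          first
            | exact hd
            | exact pvDims_set N _ i j _ hi hj0 hd
            | apply pvDims_set N _ i j _ hi hj0)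
    have hstep : ∀ i' j', 0 ≤ i' → 0 ≤ j' →
        pvGet (pvStepK cs i j dp k) i' j' = if i' = i ∧ j' = j then
          pvEstep (pvChAt cs k) (pvEv cs i (k-1)) (pvEv cs (k+1) j) (pvGet dp i j)
        else pvGet dp i' j' := by
      intro i' j' hi' hj'
      simp only [pvStepK]
      rw [← hreads.1, ← hreads.2]
      by_cases hc01 : pvChAt cs k = '0' ∨ pvChAt cs k = '1'
      · have h1 : pvChAt cs k ≠ '|' := by rcases hc01 with h | h <;> rw [h] <;> decide
        have h2 : pvChAt cs k ≠ '&' := by rcases hc01 with h | h <;> rw [h] <;> decide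
        have h3 : pvChAt cs k ≠ '^' := by rcases hc01 with h | h <;> rw [h] <;> decide
        rw [if_pos hc01]
        simp only [pvEstep]
        rw [if_neg h1, if_neg h2, if_neg h3]
        split_ifs with h
        · rw [h.1, h.2]
        · rfl
      · rw [if_neg hc01]
        by_cases hb : pvChAt cs k = '|'
        · have h2 : pvChAt cs k ≠ '&' := by rw [hb]; decide
          have h3 : pvChAt cs k ≠ '^' := by rw [hb]; decide
          rw [if_pos hb, if_neg h2, if_neg h3]
          simp only [pvEstep]
          rw [if_pos hb]
          rw [pvGet_set' N dp ⟨hd.1, hd.2⟩ i j i' j' _ hi hiN hj0 hjN hi' hj']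
        · by_cases hb2 : pvChAt cs k = '&'
          · have h3 : pvChAt cs k ≠ '^' := by rw [hb2]; decide
            rw [if_neg hb, if_pos hb2, if_neg h3]
            simp only [pvEstep]
            rw [if_neg hb, if_pos hb2]
            rw [pvGet_set' N dp ⟨hd.1, hd.2⟩ i j i' j' _ hi hiN hj0 hjN hi' hj']
          · by_cases hb3 : pvChAt cs k = '^'
            · rw [if_neg hb, if_neg hb2, if_pos hb3]
              simp only [pvEstep]
              rw [if_neg hb, if_neg hb2, if_pos hb3]
              rw [pvGet_set' N dp ⟨hd.1, hd.2⟩ i j i' j' _ hi hiN hj0 hjN hi' hj']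
            · rw [if_neg hb, if_neg hb2, if_neg hb3]
              simp only [pvEstep]
              rw [if_neg hb, if_neg hb2, if_neg hb3]
              split_ifs with h
              · rw [h.1, h.2]
              · rfl
    simp only [List.foldl_cons]
    obtain ⟨hdF, hptF⟩ := ihk (fun k' hk' => hks k' (List.mem_cons_of_mem _ hk'))
      (pvStepK cs i j dp k) hdstep
      (by
        intro k' hk1 hk2
        constructor
        · rw [hstep i (k'-1) hi (by omega), if_neg (by omega)]
          exact (hdp k' hk1 hk2).1
        · rw [hstep (k'+1) j (by omega) hj0, if_neg (by omega)]
          exact (hdp k' hk1 hk2).2)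
    refine ⟨hdF, ?_⟩
    intro i' j' hi' hj'
    rw [hptF i' j' hi' hj']
    by_cases h : i' = i ∧ j' = j
    · rw [if_pos h, if_pos h, hstep i j hi hj0, if_pos ⟨rfl, rfl⟩]
    · rw [if_neg h, if_neg h, hstep i' j' hi' hj', if_neg h]

-- the middle i-loop for one length l
lemma pvMidLoop (cs : List Char) (N : Nat) (l : Int) (hl : 2 ≤ l) (hlN : l ≤ (N : Int)) :
    ∀ (fu : Nat) (a : Int) (dp : List (List (Int × Int))), 0 ≤ a → a ≤ (N : Int) - l + 1 →
      ((N : Int) - l + 1 - a).toNat ≤ fu → pvDims N dp →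
      (∀ i' j', 0 ≤ i' → 0 ≤ j' → pvGet dp i' j' =
        if (j' < (N : Int) ∧ i' ≤ j' ∧ j' - i' + 1 ≤ l - 1) ∨
           (j' = i' + l - 1 ∧ i' < a ∧ j' < (N : Int)) then pvEv cs i' j' else (0, 0)) →
      pvDims N ((PySem.List.pyRange a ((N : Int) - l + 1) 1).foldl (fun dp i =>
          let j := i + l - 1
          (PySem.List.pyRange (i+1) j 1).foldl (pvStepK cs i j) dp) dp) ∧
      ∀ i' j', 0 ≤ i' → 0 ≤ j' →
        pvGet ((PySem.List.pyRange a ((N : Int) - l + 1) 1).foldl (fun dp i =>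
          let j := i + l - 1
          (PySem.List.pyRange (i+1) j 1).foldl (pvStepK cs i j) dp) dp) i' j' =
        if j' < (N : Int) ∧ i' ≤ j' ∧ j' - i' + 1 ≤ l then pvEv cs i' j' else (0, 0) := by
  intro fu
  induction fu with
  | zero =>
    intro a dp h0 hn hfu hd hdp
    have han : a = (N : Int) - l + 1 := by omega
    subst han
    rw [PySem.List.pyRange_one_eq_nil (by omega)]
    simp only [List.foldl_nil]
    refine ⟨hd, ?_⟩
    intro i' j' hi' hj'
    rw [hdp i' j' hi' hj']
    split_ifs with h1 h2 <;> first | rfl | omega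
  | succ fu' ih =>
    intro a dp h0 hn hfu hd hdp
    by_cases hlt : a < (N : Int) - l + 1
    · rw [PySem.List.pyRange_one_cons hlt, List.foldl_cons]
      -- one middle step: fill cell (a, a+l-1) via the inner loop
      obtain ⟨hdI, hptI⟩ := pvInnerLoop cs N a (a + l - 1) h0 (by omega) (by omega)
        (PySem.List.pyRange (a+1) (a + l - 1) 1)
        (by intro k hk; rw [PySem.List.mem_pyRange_one] at hk; omega) dp hd
        (by
          intro k hk1 hk2
          constructor
          · rw [hdp a (k-1) h0 (by omega), if_pos (by omega)]
          · rw [hdp (k+1) (a + l - 1) (by omega) (by omega), if_pos (by omega)])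
      apply ih (a + 1) _ (by omega) (by omega) (by omega) hdI
      intro i2 j2 hi2 hj2
      rw [hptI i2 j2 hi2 hj2]
      have hbase : pvGet dp a (a + l - 1) = (0, 0) := by
        rw [hdp a (a + l - 1) h0 (by omega)]
        split_ifs with h
        · omega
        · rfl
      by_cases he : i2 = a ∧ j2 = a + l - 1
      · rw [if_pos he, he.1, he.2, hbase, ← pvEv_lt cs a (a + l - 1) (by omega)]
        rw [if_pos (by omega)]
      · rw [if_neg he, hdp i2 j2 hi2 hj2]
        split_ifs with h1 h2 <;> first | rfl | omega
    · have han : a = (N : Int) - l + 1 := by omega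
      subst han
      rw [PySem.List.pyRange_one_eq_nil (by omega)]
      simp only [List.foldl_nil]
      refine ⟨hd, ?_⟩
      intro i' j' hi' hj'
      rw [hdp i' j' hi' hj']
      split_ifs with h1 h2 <;> first | rfl | omega

-- the outer l-loop
lemma pvOuterLoop (cs : List Char) (N : Nat) (hN : 1 ≤ N) :
    ∀ (fu : Nat) (L : Int) (dp : List (List (Int × Int))), 2 ≤ L → L ≤ (N : Int) + 1 →
      ((N : Int) + 1 - L).toNat ≤ fu → pvDims N dp →
      (∀ i' j', 0 ≤ i' → 0 ≤ j' → pvGet dp i' j' =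
        if j' < (N : Int) ∧ i' ≤ j' ∧ j' - i' + 1 ≤ L - 1 then pvEv cs i' j' else (0, 0)) →
      ∀ i' j', 0 ≤ i' → 0 ≤ j' →
        pvGet ((PySem.List.pyRange L ((N : Int) + 1) 1).foldl (fun dp l =>
          (PySem.List.pyRange 0 ((N : Int) - l + 1) 1).foldl (fun dp i =>
            let j := i + l - 1
            (PySem.List.pyRange (i+1) j 1).foldl (pvStepK cs i j) dp) dp) dp) i' j' =
        if j' < (N : Int) ∧ i' ≤ j' then pvEv cs i' j' else (0, 0) := by
  intro fu
  induction fu with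
  | zero =>
    intro L dp h2 hL hfu hd hdp i' j' hi' hj'
    have hLn : L = (N : Int) + 1 := by omega
    subst hLn
    rw [PySem.List.pyRange_one_eq_nil (by omega)]
    simp only [List.foldl_nil]
    rw [hdp i' j' hi' hj']
    split_ifs with h1 h3 <;> first | rfl | omega
  | succ fu' ih =>
    intro L dp h2 hL hfu hd hdp i' j' hi' hj'
    by_cases hlt : L < (N : Int) + 1
    · rw [PySem.List.pyRange_one_cons hlt, List.foldl_cons]
      obtain ⟨hdM, hptM⟩ := pvMidLoop cs N L h2 (by omega) (((N : Int) - L + 1).toNat) 0 dp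
        (by omega) (by omega) (by omega) hd
        (by
          intro i3 j3 hi3 hj3
          rw [hdp i3 j3 hi3 hj3]
          split_ifs with h1 h3 <;> first | rfl | omega)
      apply ih (L + 1) _ (by omega) (by omega) (by omega) hdM ?_ i' j' hi' hj'
      intro i2 j2 hi2 hj2
      rw [hptM i2 j2 hi2 hj2]
      split_ifs with ha hb <;> first | rfl | omega
    · have hLn : L = (N : Int) + 1 := by omega
      subst hLn
      rw [PySem.List.pyRange_one_eq_nil (by omega)]
      simp only [List.foldl_nil]
      rw [hdp i' j' hi' hj']
      split_ifs with h1 h3 <;> first | rfl | omega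

-- A's toplevel value
lemma countEval_eq (s : String) (result : Int) (hne : s.toList ≠ []) :
    countEval s result =
      (PySem.List.pyGet? [(pvEv s.toList 0 ((s.toList.length : Int) - 1)).1,
                          (pvEv s.toList 0 ((s.toList.length : Int) - 1)).2] result).getD 0 := by
  have hn : (1 : Int) ≤ (s.toList.length : Int) := by
    have : s.toList.length ≠ 0 := fun h => hne (List.eq_nil_of_length_eq_zero h)
    omega
  show (PySem.List.pyGet?
      [(pvGet ((PySem.List.pyRange 2 (PySem.Str.len s + 1) 1).foldl (fun dp l =>
            (PySem.List.pyRange 0 (PySem.Str.len s - l + 1) 1).foldl (fun dp i =>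
              let j := i + l - 1
              (PySem.List.pyRange (i+1) j 1).foldl (pvStepK s.toList i j) dp) dp)
            ((PySem.List.pyRange 0 (PySem.Str.len s) 1).foldl (fun dp i =>
              let c := pvChAt s.toList i
              let dpa := if c = '0' then pvSet dp i i (1, (pvGet dp i i).2) else dp
              if c = '1' then pvSet dpa i i ((pvGet dpa i i).1, 1) else dpa)
              ((PySem.List.pyRange 0 (PySem.Str.len s) 1).map (fun _ =>
                (PySem.List.pyRange 0 (PySem.Str.len s) 1).map (fun _ => ((0 : Int), (0 : Int)))))))
          0 (PySem.Str.len s - 1)).1,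
       (pvGet ((PySem.List.pyRange 2 (PySem.Str.len s + 1) 1).foldl (fun dp l =>
            (PySem.List.pyRange 0 (PySem.Str.len s - l + 1) 1).foldl (fun dp i =>
              let j := i + l - 1
              (PySem.List.pyRange (i+1) j 1).foldl (pvStepK s.toList i j) dp) dp)
            ((PySem.List.pyRange 0 (PySem.Str.len s) 1).foldl (fun dp i =>
              let c := pvChAt s.toList i
              let dpa := if c = '0' then pvSet dp i i (1, (pvGet dp i i).2) else dp
              if c = '1' then pvSet dpa i i ((pvGet dpa i i).1, 1) else dpa)
              ((PySem.List.pyRange 0 (PySem.Str.len s) 1).map (fun _ =>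
                (PySem.List.pyRange 0 (PySem.Str.len s) 1).map (fun _ => ((0 : Int), (0 : Int)))))))
          0 (PySem.Str.len s - 1)).2] result).getD 0 = _
  rw [PySem.Str.len_eq]
  have hd0 : pvDims s.toList.length
      ((PySem.List.pyRange 0 ((s.toList.length : Int)) 1).map (fun _ =>
        (PySem.List.pyRange 0 ((s.toList.length : Int)) 1).map (fun _ => ((0 : Int), (0 : Int))))) := by
    constructor
    · rw [List.length_map, PySem.List.length_pyRange_one]
      omega
    · intro row hrow
      rw [List.mem_map] at hrow
      obtain ⟨x, _, hx⟩ := hrow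
      rw [← hx, List.length_map, PySem.List.length_pyRange_one]
      omega
  have hg0 : ∀ i j : Int, 0 ≤ i → 0 ≤ j →
      pvGet ((PySem.List.pyRange 0 ((s.toList.length : Int)) 1).map (fun _ =>
        (PySem.List.pyRange 0 ((s.toList.length : Int)) 1).map (fun _ => ((0 : Int), (0 : Int))))) i j
        = (0, 0) := by
    intro i j hi hj
    rw [pvGet_eq _ i j hi hj]
    by_cases hir : i.toNat < s.toList.length
    · have h1 : ((PySem.List.pyRange 0 ((s.toList.length : Int)) 1).map (fun _ =>
          (PySem.List.pyRange 0 ((s.toList.length : Int)) 1).map (fun _ => ((0 : Int), (0 : Int))))).getD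
            i.toNat []
          = (PySem.List.pyRange 0 ((s.toList.length : Int)) 1).map (fun _ => ((0 : Int), (0 : Int))) := by
        rw [List.getD_eq_getElem _ _
          (by rw [List.length_map, PySem.List.length_pyRange_one]; omega)]
        simp
      rw [h1]
      by_cases hjr : j.toNat < s.toList.length
      · rw [List.getD_eq_getElem _ _
          (by rw [List.length_map, PySem.List.length_pyRange_one]; omega)]
        simp
      · rw [List.getD_eq_default _ _
          (by rw [List.length_map, PySem.List.length_pyRange_one]; omega)]
    · have h1 : ((PySem.List.pyRange 0 ((s.toList.length : Int)) 1).map (fun _ =>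
          (PySem.List.pyRange 0 ((s.toList.length : Int)) 1).map (fun _ => ((0 : Int), (0 : Int))))).getD
            i.toNat []
          = ([] : List (Int × Int)) :=
        List.getD_eq_default _ _ (by rw [List.length_map, PySem.List.length_pyRange_one]; omega)
      rw [h1]
      rfl
  obtain ⟨hdI, hgI⟩ := pvInitLoop s.toList s.toList.length ((s.toList.length : Int)).toNat 0 _
    (by omega) (by omega) (by omega) hd0
    (by
      intro i j hi hj
      rw [hg0 i j hi hj, if_neg (by omega)])
  have houter := pvOuterLoop s.toList s.toList.length (by omega)
    (((s.toList.length : Int) + 1 - 2).toNat) 2 _ (by omega) (by omega) (by omega) hdI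
    (by
      intro i' j' hi' hj'
      rw [hgI i' j' hi' hj']
      split_ifs with h1 h2 <;> first | rfl | omega | rw [h1.1])
    0 ((s.toList.length : Int) - 1) (by omega) (by omega)
  rw [if_pos (by omega)] at houter
  rw [houter]

-- ===== VERDICT (by name: the statement is the Claim_ definition above) =====
theorem countEval_spec : Claim_equal_countEval := by
  intro s result _ hpre
  unfold Spec_countEval
  rw [countEval_eq s result hpre.1, countEval_alt_eq s result]
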